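-- pv_equiv track=rewrite | github.com/kkr010128/codebert | problem122/problem122_117.py | solve
-- ===== SOURCE A (Python) =====
-- from collections import Counter
--
-- def solve(N: int, A: "List[int]", Q: int, BC: "List[(int,int)]"):
--     A = Counter(A)
--     answers = []
--     ans = ans = sum((i * n for i, n in A.items()))
--     for b, c in BC:
--         if b != c:
--             ans += (c - b) * A[b]
--             A[c] += A[b]
--             del A[b]
--         answers.append(ans)
--     return answers
-- ===== SOURCE B (Python) =====
-- def solve(N: int, A: "List[int]", Q: int, BC: "List[(int,int)]"):
--     arr = list(A)
--     answers = []
--     for b, c in BC: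
--         arr = [c if x == b else x for x in arr]
--         answers.append(sum(arr))
--     return answers
-- ===== Notes on version B (the rewrite author's own statement) =====
-- stated objective: simpler
-- what changed: B drops the Counter and the incrementally maintained sum entirely: it keeps the actual element list, rewrites every occurrence of b to c with a full scan per query, and recomputes sum(arr) each step.
import Mathlib
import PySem

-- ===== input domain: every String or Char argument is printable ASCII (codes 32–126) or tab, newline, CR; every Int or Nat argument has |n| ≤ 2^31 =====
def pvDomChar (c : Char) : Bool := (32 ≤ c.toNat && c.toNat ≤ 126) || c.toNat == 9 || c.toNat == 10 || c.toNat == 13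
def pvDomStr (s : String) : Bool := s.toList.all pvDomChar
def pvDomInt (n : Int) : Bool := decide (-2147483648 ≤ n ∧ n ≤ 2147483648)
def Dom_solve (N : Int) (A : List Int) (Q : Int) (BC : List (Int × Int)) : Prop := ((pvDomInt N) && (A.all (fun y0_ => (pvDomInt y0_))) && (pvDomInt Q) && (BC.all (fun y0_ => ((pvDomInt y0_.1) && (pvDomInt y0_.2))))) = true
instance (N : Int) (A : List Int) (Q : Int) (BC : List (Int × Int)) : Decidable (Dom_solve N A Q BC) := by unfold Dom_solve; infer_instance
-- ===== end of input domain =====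

-- B replaces A's Counter-plus-incremental-sum bookkeeping by keeping the actual element
-- list and recomputing each answer as the sum of the rewritten list (simpler, not faster).

-- ===== PORT A =====
-- one query step of A's loop: the if b != c block, then answers.append(ans)
def solveStepA (st : PySem.Dict Int Int × Int × List Int) (bc : Int × Int) :
    PySem.Dict Int Int × Int × List Int :=
  let cnt := st.1
  let ans := st.2.1
  let answers := st.2.2
  if bc.1 != bc.2 then
    let ans := ans + (bc.2 - bc.1) * cnt.getD bc.1 0
    let cnt := cnt.insert bc.2 (cnt.getD bc.2 0 + cnt.getD bc.1 0)
    let cnt := cnt.erase bc.1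
    (cnt, ans, answers ++ [ans])
  else
    (cnt, ans, answers ++ [ans])

def solve (N : Int) (A : List Int) (Q : Int) (BC : List (Int × Int)) : List Int :=
  let cnt := PySem.Dict.counter A
  let answers : List Int := []
  let ans := (cnt.items.map (fun p => p.1 * p.2)).sum
  (BC.foldl solveStepA (cnt, ans, answers)).2.2

-- ===== PORT B =====
-- one query step of B's loop: arr = [c if x == b else x for x in arr]; answers.append(sum(arr))
def solveStepB (st : List Int × List Int) (bc : Int × Int) : List Int × List Int :=
  let arr := st.1.map (fun x => if x == bc.1 then bc.2 else x)
  (arr, st.2 ++ [arr.sum])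

def solve_alt (N : Int) (A : List Int) (Q : Int) (BC : List (Int × Int)) : List Int :=
  (BC.foldl solveStepB (A, [])).2

-- ===== PRECONDITION & SPEC =====
def Spec_solve (N : Int) (A : List Int) (Q : Int) (BC : List (Int × Int)) (out : List Int) : Prop := out = solve_alt N A Q BC
instance (N : Int) (A : List Int) (Q : Int) (BC : List (Int × Int)) (out : List Int) : Decidable (Spec_solve N A Q BC out) := by unfold Spec_solve; infer_instance

-- ===== CLAIM (what is proved, stated in full; the proofs are below) =====
def Claim_equal_solve : Prop := ∀ (N : Int) (A : List Int) (Q : Int) (BC : List (Int × Int)), Dom_solve N A Q BC → Spec_solve N A Q BC (solve N A Q BC)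

-- ===== LEMMAS AND PROOFS =====

-- getD after erase (no PySem lemma covers erase lookups)
theorem getD_erase (d : PySem.Dict Int Int) (k x : Int) :
    (d.erase k).getD x 0 = if x = k then 0 else d.getD x 0 := by
  obtain ⟨items⟩ := d
  induction items with
  | nil => simp [PySem.Dict.erase, PySem.Dict.getD, PySem.Dict.get?]
  | cons p rest ih =>
      by_cases h1 : p.1 = k <;> by_cases h2 : p.1 = x <;>
        simp_all [PySem.Dict.erase, PySem.Dict.getD, PySem.Dict.get?]

-- summing (if k = x then k else 0) over a nodup list containing x gives x
theorem sum_map_ite_self (S : List Int) (x : Int) (hS : S.Nodup) (hx : x ∈ S) :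
    (S.map (fun k => if k = x then k else 0)).sum = x := by
  induction S with
  | nil => cases hx
  | cons a S ih =>
      simp only [List.map_cons, List.sum_cons]
      by_cases hax : a = x
      · subst hax
        have hnot : a ∉ S := (List.nodup_cons.1 hS).1
        have hz : (S.map (fun k => if k = a then k else 0)).sum = 0 := by
          rw [List.sum_eq_zero]
          intro y hy
          obtain ⟨k, hk, rfl⟩ := List.mem_map.1 hy
          have : k ≠ a := fun e => hnot (e ▸ hk)
          simp [this]
        simp [hz]
      · have hx' : x ∈ S := by
          rcases List.mem_cons.1 hx with h | h
          · exact absurd h.symm hax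
          · exact h
        simp [hax, ih (List.nodup_cons.1 hS).2 hx']

-- Σ_{k ∈ S} k * count(k, l) = sum l, for nodup S covering l
theorem sum_counts (l S : List Int) (hS : S.Nodup) (hsub : ∀ y ∈ l, y ∈ S) :
    (S.map (fun k => k * (l.count k : Int))).sum = l.sum := by
  induction l with
  | nil => simp
  | cons x l ih =>
      have hx : x ∈ S := hsub x (List.mem_cons_self)
      have hsub' : ∀ y ∈ l, y ∈ S := fun y hy => hsub y (List.mem_cons_of_mem _ hy)
      have : (S.map (fun k => k * ((x :: l).count k : Int))) =
          S.map (fun k => k * (l.count k : Int) + (if k = x then k else 0)) := by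
        apply List.map_congr_left
        intro k _
        by_cases h : k = x
        · subst h
          simp [List.count_cons]
          push_cast
          ring
        · have hcnt : (x :: l).count k = l.count k := by simp [List.count_cons, h, Ne.symm h]
          rw [hcnt, if_neg h, add_zero]
      rw [this, PySem.List.sum_map_add_int, ih hsub', sum_map_ite_self S x hS hx,
        List.sum_cons]
      ring

-- initial ans of A equals the plain sum of the list
theorem counter_items_sum (l : List Int) :
    ((PySem.Dict.counter l).items.map (fun p => p.1 * p.2)).sum = l.sum := by
  rw [PySem.Dict.items_counter, List.map_map]
  exact sum_counts l _ (PySem.Set.nodup_ofList l) (fun y hy => (PySem.Set.mem_ofList _ _).2 hy)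

-- effect of one replacement pass on the sum (any b, c)
theorem sum_map_repl (l : List Int) (b c : Int) :
    (l.map (fun x => if x = b then c else x)).sum = l.sum + (c - b) * (l.count b : Int) := by
  induction l with
  | nil => simp
  | cons x l ih =>
      by_cases h : x = b <;> simp [List.count_cons, h, ih] <;> push_cast <;> ring

-- effect of one replacement pass on counts (b ≠ c), stated over Int
theorem count_map_repl (l : List Int) (b c : Int) (hbc : b ≠ c) (k : Int) :
    ((l.map (fun x => if x = b then c else x)).count k : Int) =
      if k = b then 0 else if k = c then (l.count c : Int) + (l.count b : Int)
      else (l.count k : Int) := by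
  induction l with
  | nil => simp
  | cons x l ih =>
      by_cases hxb : x = b <;> by_cases hkb : k = b <;> by_cases hkc : k = c <;>
        by_cases hkx : k = x <;>
        simp_all [List.count_cons] <;> omega

-- the two loops produce the same answers list under the invariant
theorem loop_eq (BC : List (Int × Int)) (cnt : PySem.Dict Int Int) (ans : Int)
    (arr acc : List Int)
    (hc : ∀ k, cnt.getD k 0 = (arr.count k : Int)) (ha : ans = arr.sum) :
    (BC.foldl solveStepA (cnt, ans, acc)).2.2 = (BC.foldl solveStepB (arr, acc)).2 := by
  induction BC generalizing cnt ans arr acc with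
  | nil => simp
  | cons bc BC ih =>
      obtain ⟨b, c⟩ := bc
      by_cases hbc : b = c
      · subst hbc
        have harr : arr.map (fun x => if x == b then b else x) = arr := by
          rw [show (fun x => if x == b then b else x) = id from ?_, List.map_id]
          funext x; by_cases h : x = b <;> simp [h]
        simp only [List.foldl_cons, solveStepA, solveStepB, bne_self_eq_false,
          if_neg Bool.false_ne_true, harr]
        rw [ha]
        exact ih cnt arr.sum arr (acc ++ [arr.sum]) hc rfl
      · have hne : (b != c) = true := by simp [hbc]
        simp only [List.foldl_cons, solveStepA, solveStepB, beq_iff_eq, hne, if_true]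
        have hsum : (arr.map (fun x => if x = b then c else x)).sum
            = ans + (c - b) * cnt.getD b 0 := by
          rw [sum_map_repl, ha, hc b]
        rw [hsum]
        apply ih
        · intro k
          rw [getD_erase, PySem.Dict.getD_insert, count_map_repl arr b c hbc k]
          simp only [hc]
        · exact hsum.symm

-- ===== VERDICT (by name: the statement is the Claim_ definition above) =====
theorem solve_spec : Claim_equal_solve := by
  intro N A Q BC _
  show solve N A Q BC = solve_alt N A Q BC
  unfold solve solve_alt
  exact loop_eq BC (PySem.Dict.counter A) _ A []
    (fun k => by simpa using PySem.Dict.getD_counter A k)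
    (counter_items_sum A)
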